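-- pv_equiv track=rewrite | github.com/rednur01/ProjectEuler | 017/main.py | spell_count
-- ===== SOURCE A (Python) =====
-- spelling_length: dict[int, int] = {
--   1: 3,
--   2: 3,
--   3: 5,
--   4: 4,
--   5: 4,
--   6: 3,
--   7: 5,
--   8: 5,
--   9: 4,
--   10: 3,
--   11: 6,
--   12: 6,
--   13: 8,
--   14: 8,
--   15: 7,
--   16: 7,
--   17: 9,
--   18: 8,
--   19: 8,
--   20: 6,
--   30: 6,
--   40: 5,
--   50: 5,
--   60: 5,
--   70: 7,
--   80: 6,
--   90: 6
-- }
--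
-- def spell_count(n: int) -> int:
--   if n <= 20:
--     return spelling_length[n]
--
--   elif n > 20 and n < 100:
--     ones: int = n % 10
--     tens: int = n - ones
--
--     if ones == 0:
--       return spelling_length[tens]
--     else:
--       return spelling_length[tens] + spelling_length[ones]
--
--   elif n >= 100 and n < 1000:
--     tens_ones: int = n % 100
--     hundreds_digit: int = n // 100
--
--     hundreds_count = spelling_length[hundreds_digit] + 7 # 'hundred'
--     if tens_ones != 0:
--       hundreds_count += spell_count(tens_ones) + 3 # 'and'
--     return hundreds_count
--
--   elif n == 1000:
--     return 11 # 'one thousand'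
--   else:
--     return 0
-- ===== SOURCE B (Python) =====
-- ONES = {1: 'one', 2: 'two', 3: 'three', 4: 'four', 5: 'five', 6: 'six',
--         7: 'seven', 8: 'eight', 9: 'nine', 10: 'ten', 11: 'eleven',
--         12: 'twelve', 13: 'thirteen', 14: 'fourteen', 15: 'fifteen',
--         16: 'sixteen', 17: 'seventeen', 18: 'eighteen', 19: 'nineteen'}
-- TENS = {20: 'twenty', 30: 'thirty', 40: 'forty', 50: 'fifty',
--         60: 'sixty', 70: 'seventy', 80: 'eighty', 90: 'ninety'}
--
-- def _spell(n):
--     # spell 1..999 without spaces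
--     if n >= 100:
--         h, r = divmod(n, 100)
--         s = ONES[h] + 'hundred'
--         return s + ('and' + _spell(r) if r else '')
--     if n >= 20:
--         t, o = divmod(n, 10)
--         return TENS[t * 10] + (ONES[o] if o else '')
--     return ONES[n]
--
-- def spell_count(n):
--     if n == 1000:
--         return len('onethousand')
--     if n > 1000:
--         return 0
--     return len(_spell(n))
-- ===== Notes on version B (the rewrite author's own statement) =====
-- stated objective: idiomatic
-- what changed: B spells the number out as an actual word string via ones/tens word dicts and divmod decomposition and returns the letter count, instead of A's hand-tabulated per-word letter counts summed across a branch chain.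
import Mathlib
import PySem

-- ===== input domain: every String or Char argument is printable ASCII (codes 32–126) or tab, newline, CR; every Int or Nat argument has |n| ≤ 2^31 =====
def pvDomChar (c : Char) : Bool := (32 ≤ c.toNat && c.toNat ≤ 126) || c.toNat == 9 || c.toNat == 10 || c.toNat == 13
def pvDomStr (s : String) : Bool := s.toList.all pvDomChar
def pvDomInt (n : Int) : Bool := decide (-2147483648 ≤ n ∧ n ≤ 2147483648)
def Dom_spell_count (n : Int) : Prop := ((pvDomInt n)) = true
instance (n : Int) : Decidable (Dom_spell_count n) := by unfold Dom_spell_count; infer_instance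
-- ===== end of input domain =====

-- B spells the number out as a word string (dicts of words, divmod decomposition) and
-- returns its letter count, instead of A's table of per-word letter counts; objective: idiomatic.

-- ===== PORT A =====
-- the module-level dict of letter counts (Python dict[int, int])
def spelling_length : PySem.Dict Int Int := PySem.Dict.ofList
  [(1, 3), (2, 3), (3, 5), (4, 4), (5, 4), (6, 3), (7, 5), (8, 5), (9, 4),
   (10, 3), (11, 6), (12, 6), (13, 8), (14, 8), (15, 7), (16, 7), (17, 9),
   (18, 8), (19, 8), (20, 6), (30, 6), (40, 5), (50, 5), (60, 5), (70, 7),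
   (80, 6), (90, 6)]

-- dict lookup spelling_length[k]: KeyError (= none) is excluded by Pre_; default 0 never read there.
-- fuel is a pure totality guard (recursive call has tens_ones < n, so n.toNat + 1 always suffices)
def spellCountGo : Nat → Int → Int
  | 0, _ => 0
  | fuel + 1, n =>
    if n ≤ 20 then (spelling_length.get? n).getD 0
    else if 20 < n ∧ n < 100 then
      let ones := PySem.Int.mod n 10
      let tens := n - ones
      if ones = 0 then (spelling_length.get? tens).getD 0
      else (spelling_length.get? tens).getD 0 + (spelling_length.get? ones).getD 0
    else if 100 ≤ n ∧ n < 1000 then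
      let tens_ones := PySem.Int.mod n 100
      let hundreds_digit := PySem.Int.floordiv n 100
      let hundreds_count := (spelling_length.get? hundreds_digit).getD 0 + 7
      if tens_ones ≠ 0 then hundreds_count + spellCountGo fuel tens_ones + 3
      else hundreds_count
    else if n = 1000 then 11
    else 0

def spell_count (n : Int) : Int := spellCountGo (n.toNat + 1) n

-- ===== PORT B =====
-- B's word dicts (Python dict[int, str]); strings kept as List Char (PySem.Chars side)
def pvONES : PySem.Dict Int (List Char) := PySem.Dict.ofList
  [(1, "one".toList), (2, "two".toList), (3, "three".toList), (4, "four".toList),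
   (5, "five".toList), (6, "six".toList), (7, "seven".toList), (8, "eight".toList),
   (9, "nine".toList), (10, "ten".toList), (11, "eleven".toList), (12, "twelve".toList),
   (13, "thirteen".toList), (14, "fourteen".toList), (15, "fifteen".toList),
   (16, "sixteen".toList), (17, "seventeen".toList), (18, "eighteen".toList),
   (19, "nineteen".toList)]
def pvTENS : PySem.Dict Int (List Char) := PySem.Dict.ofList
  [(20, "twenty".toList), (30, "thirty".toList), (40, "forty".toList), (50, "fifty".toList),
   (60, "sixty".toList), (70, "seventy".toList), (80, "eighty".toList), (90, "ninety".toList)]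

-- _spell: spell 1..999 without spaces (KeyError = none excluded by Pre_; default [] never read there).
-- fuel is a pure totality guard (recursive call has r < n)
def pvSpellGo : Nat → Int → List Char
  | 0, _ => []
  | fuel + 1, n =>
    if 100 ≤ n then
      let h := PySem.Int.floordiv n 100
      let r := PySem.Int.mod n 100
      let s := (pvONES.get? h).getD [] ++ "hundred".toList
      if r ≠ 0 then s ++ "and".toList ++ pvSpellGo fuel r else s
    else if 20 ≤ n then
      let t := PySem.Int.floordiv n 10
      let o := PySem.Int.mod n 10
      (pvTENS.get? (t * 10)).getD [] ++ (if o ≠ 0 then (pvONES.get? o).getD [] else [])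
    else (pvONES.get? n).getD []

def pvSpell (n : Int) : List Char := pvSpellGo (n.toNat + 1) n

def spell_count_alt (n : Int) : Int :=
  if n = 1000 then PySem.Chars.len "onethousand".toList
  else if n > 1000 then 0
  else PySem.Chars.len (pvSpell n)

-- ===== PRECONDITION & SPEC =====
-- Pre_ excludes exactly n ≤ 0, where Python A raises KeyError (spelling_length[n] with n ≤ 0).
def Pre_spell_count (n : Int) : Prop := 1 ≤ n
instance (n : Int) : Decidable (Pre_spell_count n) := by unfold Pre_spell_count; infer_instance
def pvWitness_spell_count : Int := (342)

def Spec_spell_count (n : Int) (out : Int) : Prop := out = spell_count_alt n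
instance (n : Int) (out : Int) : Decidable (Spec_spell_count n out) := by unfold Spec_spell_count; infer_instance

-- ===== CLAIM (what is proved, stated in full; the proofs are below) =====
def Claim_equal_spell_count : Prop := ∀ (n : Int), Dom_spell_count n → Pre_spell_count n → Spec_spell_count n (spell_count n)

-- ===== LEMMAS AND PROOFS =====

-- agreement on the finite range 1..1000, checked by evaluation
set_option maxRecDepth 16000 in
theorem spell_agree_small : ∀ k ∈ List.range 1000, spell_count ((k : Int) + 1) = spell_count_alt ((k : Int) + 1) := by decide

theorem spell_count_big (n : Int) (h : 1000 < n) : spell_count n = 0 := by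
  unfold spell_count
  simp only [spellCountGo]
  rw [if_neg (by omega), if_neg (by omega), if_neg (by omega), if_neg (by omega)]

theorem spell_count_alt_big (n : Int) (h : 1000 < n) : spell_count_alt n = 0 := by
  unfold spell_count_alt
  rw [if_neg (by omega), if_pos (by omega)]

-- ===== VERDICT (by name: the statement is the Claim_ definition above) =====
theorem spell_count_spec : Claim_equal_spell_count := by
  intro n _ hpre
  unfold Spec_spell_count
  by_cases hb : 1000 < n
  · rw [spell_count_big n hb, spell_count_alt_big n hb]
  · have hk : n = ((n - 1).toNat : Int) + 1 := by unfold Pre_spell_count at hpre; omega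
    have hlt : (n - 1).toNat ∈ List.range 1000 := by
      simp [List.mem_range]; unfold Pre_spell_count at hpre; omega
    rw [hk]
    exact spell_agree_small _ hlt
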